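-- pv_equiv track=rewrite | github.com/lenlee2016/2017F6RD | Python3construct001.py | ContainExtr
-- ===== SOURCE A (Python) =====
-- def ContainExtr(ContainList):
-- 	temp = []
-- 	temp = list(ContainList)
-- 	char = str(len(temp))
-- 	value = 0
-- 	for i in range(0,len(temp)):
-- 		value =value + (temp.pop() * (10 **i))
-- 	ContainExtr=("%0"+char+"d")%(value)
-- 	return ContainExtr
-- ===== SOURCE B (Python) =====
-- def ContainExtr(ContainList):
--     value = 0
--     for x in ContainList:
--         value = value * 10 + x
--     return ('%0' + str(len(ContainList)) + 'd') % value
-- ===== Notes on version B (the rewrite author's own statement) =====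
-- stated objective: faster
-- what changed: Replaces A's copy-then-pop-from-the-back loop with explicit big-int powers 10**i by a single forward Horner pass (value = value*10 + x) that never copies or mutates a list.
import Mathlib
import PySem

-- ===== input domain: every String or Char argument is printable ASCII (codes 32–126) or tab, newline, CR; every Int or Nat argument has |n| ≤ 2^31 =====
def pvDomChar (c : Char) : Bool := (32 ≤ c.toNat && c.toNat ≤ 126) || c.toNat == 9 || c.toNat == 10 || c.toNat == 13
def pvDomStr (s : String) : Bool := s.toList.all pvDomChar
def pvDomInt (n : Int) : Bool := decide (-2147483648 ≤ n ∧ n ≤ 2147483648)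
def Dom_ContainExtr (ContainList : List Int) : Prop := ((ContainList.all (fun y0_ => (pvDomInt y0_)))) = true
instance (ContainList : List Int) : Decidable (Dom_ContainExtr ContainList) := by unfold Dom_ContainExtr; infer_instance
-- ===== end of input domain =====

-- B replaces A's copy-then-pop-from-the-back loop with powers 10**i by one forward
-- Horner pass (value = value*10 + x), same zero-padded result; objective: simpler.

-- Shared helper: Python's ('%0' + str(w) + 'd') % v zero-padded formatting (both
-- Pythons build this exact format string from the list length); exact for any Int v
-- and width w = list length (sign counts toward the width, as in Python).
def pyFmtZeroPad (w : Int) (v : Int) : String :=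
  let cs := PySem.Int.toChars v
  if cs.length < w.toNat then
    match cs with
    | '-' :: rest => String.ofList ('-' :: (List.replicate (w.toNat - cs.length) '0' ++ rest))
    | _ => String.ofList (List.replicate (w.toNat - cs.length) '0' ++ cs)
  else String.ofList cs

-- ===== PORT A =====
-- temp = list(ContainList); for i in range(0, len(temp)): value += temp.pop() * 10**i
-- (the 'none' branch of pop? is unreachable: the loop runs exactly len(temp) times)
def ContainExtr (ContainList : List Int) : String :=
  let temp : List Int := ContainList
  let st := (PySem.List.pyRange 0 (temp.length) 1).foldl
    (fun (st : List Int × Int) i =>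
      match PySem.List.pop? st.1 (-1) with
      | some (x, rest) => (rest, st.2 + x * (10 : Int) ^ i.toNat)
      | none => st)
    (temp, (0 : Int))
  pyFmtZeroPad (temp.length) st.2

-- ===== PORT B =====
def ContainExtr_alt (ContainList : List Int) : String :=
  let value := ContainList.foldl (fun v x => v * 10 + x) 0
  pyFmtZeroPad (ContainList.length) value

-- ===== PRECONDITION & SPEC =====
def Spec_ContainExtr (ContainList : List Int) (out : String) : Prop := out = ContainExtr_alt ContainList
instance (ContainList : List Int) (out : String) : Decidable (Spec_ContainExtr ContainList out) := by unfold Spec_ContainExtr; infer_instance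

-- ===== CLAIM (what is proved, stated in full; the proofs are below) =====
def Claim_equal_ContainExtr : Prop := ∀ (ContainList : List Int), Dom_ContainExtr ContainList → Spec_ContainExtr ContainList (ContainExtr ContainList)

-- ===== LEMMAS AND PROOFS =====

-- A's pop loop over range(a, a+m) on a list of length m empties the list and adds
-- 10^a times the Horner value of the list.
lemma popLoop_eq_horner (m : Nat) : ∀ (a : Nat) (temp : List Int) (v : Int),
    temp.length = m →
    (PySem.List.pyRange (a : Int) ((a : Int) + (m : Int)) 1).foldl
      (fun (st : List Int × Int) i =>
        match PySem.List.pop? st.1 (-1) with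
        | some (x, rest) => (rest, st.2 + x * (10 : Int) ^ i.toNat)
        | none => st)
      (temp, v)
    = ([], v + (10 : Int) ^ a * temp.foldl (fun v x => v * 10 + x) 0) := by
  induction m with
  | zero =>
    intro a temp v h
    rw [List.length_eq_zero_iff] at h
    subst h
    rw [PySem.List.pyRange_one_eq_nil (by omega)]
    simp
  | succ m ih =>
    intro a temp v h
    rcases (List.eq_nil_or_concat temp) with rfl | ⟨ys, x, rfl⟩
    · simp at h
    · have hys : ys.length = m := by simpa using h
      rw [PySem.List.pyRange_one_cons (by push_cast; omega)]
      simp only [List.concat_eq_append, List.foldl_cons, PySem.List.pop?_last]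
      have : ((a : Int) + 1) = ((a + 1 : Nat) : Int) := by push_cast; ring
      have hrange : (a : Int) + (((m : Nat) : Int) + 1) = ((a + 1 : Nat) : Int) + (m : Int) := by
        push_cast; ring
      push_cast
      rw [hrange, this, ih (a + 1) ys (v + x * (10 : Int) ^ ((a : Int)).toNat) hys]
      have hfold : (ys ++ [x]).foldl (fun v x => v * 10 + x) (0 : Int)
          = (ys.foldl (fun v x => v * 10 + x) 0) * 10 + x := by
        simp
      rw [hfold]
      have ht : ((a : Int)).toNat = a := by simp
      rw [ht]
      simp only [Prod.mk.injEq, true_and]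
      ring

-- ===== VERDICT (by name: the statement is the Claim_ definition above) =====
theorem ContainExtr_spec : Claim_equal_ContainExtr := by
  intro xs _
  have h := popLoop_eq_horner xs.length 0 xs 0 rfl
  simp only [Nat.cast_zero, zero_add] at h
  simp only [Spec_ContainExtr, ContainExtr, ContainExtr_alt, h, pow_zero, one_mul]
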